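-- pv_equiv track=rewrite | github.com/ccc114b/cccocw | _book/alg/_code/05/05-2-binary-search.py | binary_search_insert_position
-- ===== SOURCE A (Python) =====
-- from typing import List, Any, Tuple, Callable
--
-- def binary_search_insert_position(arr: List[Any], target: Any) -> int:
--     """
--     找出插入位置
--
--     參數:
--         arr: 已排序陣列
--         target: 目標值
--
--     返回:
--         應該插入的位置
--     """
--     left, right = 0, len(arr)
--
--     while left < right:
--         mid = (left + right) // 2
--
--         if arr[mid] < target:
--             left = mid + 1
--         else:
--             right = mid
--
--     return left
-- ===== SOURCE B (Python) =====
-- def binary_search_insert_position(arr, target):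
--     """Divide-and-conquer on slices: recurse into the half that must contain
--     the leftmost insertion point, adding the offset of the discarded prefix."""
--     if not arr:
--         return 0
--     mid = len(arr) // 2
--     if arr[mid] < target:
--         return mid + 1 + binary_search_insert_position(arr[mid + 1:], target)
--     else:
--         return binary_search_insert_position(arr[:mid], target)
-- ===== Notes on version B (the rewrite author's own statement) =====
-- stated objective: alternative
-- what changed: Replaces the iterative two-index while loop with a divide-and-conquer recursion on list slices that returns a relative offset and adds back the discarded prefix length; no left/right indices are maintained.
import Mathlib
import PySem

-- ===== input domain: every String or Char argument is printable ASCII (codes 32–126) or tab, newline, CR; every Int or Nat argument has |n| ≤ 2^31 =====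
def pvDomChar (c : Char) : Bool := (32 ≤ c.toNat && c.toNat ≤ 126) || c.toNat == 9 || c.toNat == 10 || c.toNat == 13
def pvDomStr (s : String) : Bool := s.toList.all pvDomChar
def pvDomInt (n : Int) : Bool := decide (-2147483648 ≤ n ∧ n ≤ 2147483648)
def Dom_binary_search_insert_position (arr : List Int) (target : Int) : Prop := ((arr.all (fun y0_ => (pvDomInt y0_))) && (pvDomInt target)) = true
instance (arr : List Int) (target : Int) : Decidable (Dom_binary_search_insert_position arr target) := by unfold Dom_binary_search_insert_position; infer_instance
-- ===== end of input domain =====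

-- B replaces A's iterative two-index while loop by a divide-and-conquer recursion on
-- list slices (relative offset + discarded prefix length); objective: alternative.

-- ===== PORT A =====
-- A's while loop, state (left, right); `mid` is inlined.
def bsLoop (arr : List Int) (target : Int) (left right : Int) : Int :=
  if _h : left < right then
    if PySem.List.pyGetD arr (PySem.Int.floordiv (left + right) 2) 0 < target then
      bsLoop arr target (PySem.Int.floordiv (left + right) 2 + 1) right
    else
      bsLoop arr target left (PySem.Int.floordiv (left + right) 2)
  else left
termination_by (right - left).toNat
decreasing_by
  all_goals
    have hb := PySem.Int.floordiv_two_mid_bounds (le_of_lt _h)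
    have h2 := PySem.Int.floordiv_lt_iff_lt_mul (a := left + right) (b := 2) (q := right) (by omega)
    omega

def binary_search_insert_position (arr : List Int) (target : Int) : Int :=
  bsLoop arr target 0 (arr.length : Int)

-- ===== PORT B =====
def binary_search_insert_position_alt (arr : List Int) (target : Int) : Int :=
  if _h : arr = [] then 0
  else
    if PySem.List.pyGetD arr ((arr.length / 2 : Nat) : Int) 0 < target then
      ((arr.length / 2 : Nat) : Int) + 1
        + binary_search_insert_position_alt (PySem.List.slice arr (some (((arr.length / 2 : Nat) : Int) + 1)) none) target
    else
      binary_search_insert_position_alt (PySem.List.slice arr none (some ((arr.length / 2 : Nat) : Int))) target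
termination_by arr.length
decreasing_by
  · have hs : PySem.List.slice arr (some (((arr.length / 2 : Nat) : Int) + 1)) none
        = arr.drop (arr.length / 2 + 1) := by
      rw [show (((arr.length / 2 : Nat) : Int) + 1) = (((arr.length / 2 + 1 : Nat)) : Int) by push_cast; ring]
      exact PySem.List.slice_from_natCast arr _
    simp only [hs, List.length_drop]
    have hne : arr.length ≠ 0 := fun h => _h (List.eq_nil_of_length_eq_zero h)
    omega
  · rw [PySem.List.slice_to_natCast]
    simp only [List.length_take]
    have hne : arr.length ≠ 0 := fun h => _h (List.eq_nil_of_length_eq_zero h)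
    omega

-- ===== PRECONDITION & SPEC =====
def Spec_binary_search_insert_position (arr : List Int) (target : Int) (out : Int) : Prop := out = binary_search_insert_position_alt arr target
instance (arr : List Int) (target : Int) (out : Int) : Decidable (Spec_binary_search_insert_position arr target out) := by unfold Spec_binary_search_insert_position; infer_instance

-- ===== CLAIM (what is proved, stated in full; the proofs are below) =====
def Claim_equal_binary_search_insert_position : Prop := ∀ (arr : List Int) (target : Int), Dom_binary_search_insert_position arr target → Spec_binary_search_insert_position arr target (binary_search_insert_position arr target)

-- ===== LEMMAS AND PROOFS =====

-- Invariant: the loop on window [lo, hi) computes lo plus B's recursion on the slice arr[lo:hi].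
theorem bsLoop_eq_alt (arr : List Int) (target : Int) :
    ∀ (d : Nat) (lo hi : Int), (hi - lo).toNat = d → 0 ≤ lo → lo ≤ hi → hi ≤ (arr.length : Int) →
      bsLoop arr target lo hi
        = lo + binary_search_insert_position_alt ((arr.drop lo.toNat).take (hi - lo).toNat) target := by
  intro d
  induction d using Nat.strong_induction_on with
  | _ d ih =>
    intro lo hi hd h0 hlh hhl
    by_cases hlt : lo < hi
    · -- window nonempty
      set l := lo.toNat with hldef
      set d' := (hi - lo).toNat with hd'def
      set m := d' / 2 with hmdef
      set sub := (arr.drop l).take d' with hsubdef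
      have hlen : sub.length = d' := by
        simp only [hsubdef, List.length_take, List.length_drop]
        omega
      have hd'pos : 0 < d' := by omega
      have hmlt : m < d' := by omega
      have hfd : PySem.Int.floordiv (lo + hi) 2 = lo + (m : Int) := by
        rw [PySem.Int.floordiv_eq_ediv_of_pos (by omega : (0:Int) < 2)]
        omega
      have hidx : l + m < arr.length := by omega
      have hsubm : sub[m]'(by omega) = arr[l + m]'hidx := by
        simp [hsubdef]
      have hA : PySem.List.pyGetD arr (lo + (m : Int)) 0 = arr[l + m]'hidx := by
        rw [show lo + (m : Int) = ((l + m : Nat) : Int) by omega]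
        rw [PySem.List.pyGetD_natCast]
        exact List.getD_eq_getElem _ _ hidx
      have hB : PySem.List.pyGetD sub ((m : Nat) : Int) 0 = arr[l + m]'hidx := by
        rw [PySem.List.pyGetD_natCast]
        rw [List.getD_eq_getElem _ _ (by omega)]
        exact hsubm
      have hsubne : sub ≠ [] := by
        intro h
        rw [h] at hlen
        simp at hlen
        omega
      have hsm : sub.length / 2 = m := by omega
      rw [bsLoop, dif_pos hlt, hfd, hA]
      conv_rhs => rw [binary_search_insert_position_alt]
      rw [dif_neg hsubne]
      simp only [hsm]
      rw [hB]
      by_cases hc : arr[l + m]'hidx < target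
      · rw [if_pos hc, if_pos hc]
        -- recurse right: window [lo+m+1, hi) vs slice sub[m+1:]
        have hslice : PySem.List.slice sub (some (((m : Nat) : Int) + 1)) none
            = (arr.drop (l + (m + 1))).take (d' - (m + 1)) := by
          rw [show (((m : Nat) : Int) + 1) = (((m + 1 : Nat)) : Int) by push_cast; ring]
          rw [PySem.List.slice_from_natCast]
          rw [hsubdef, List.drop_take, List.drop_drop]
        have hrec := ih (d' - (m + 1)) (by omega) (lo + (m : Int) + 1) hi (by omega) (by omega) (by omega) hhl
        rw [hrec]
        rw [show (lo + (m : Int) + 1).toNat = l + (m + 1) by omega]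
        rw [show (hi - (lo + (m : Int) + 1)).toNat = d' - (m + 1) by omega]
        rw [hslice]
        ring
      · rw [if_neg hc, if_neg hc]
        -- recurse left: window [lo, lo+m) vs slice sub[:m]
        have hslice : PySem.List.slice sub none (some ((m : Nat) : Int))
            = (arr.drop l).take m := by
          rw [PySem.List.slice_to_natCast]
          rw [hsubdef, List.take_take]
          congr 1
          omega
        have hrec := ih m (by omega) lo (lo + (m : Int)) (by omega) h0 (by omega) (by omega)
        rw [hrec]
        rw [show (lo + (m : Int) - lo).toNat = m by omega]
        rw [hslice]
    · -- empty window: lo = hi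
      have hlohi : lo = hi := le_antisymm hlh (not_lt.mp hlt)
      rw [bsLoop, dif_neg hlt]
      rw [show (hi - lo).toNat = 0 by omega]
      rw [List.take_zero]
      rw [binary_search_insert_position_alt, dif_pos rfl]
      omega

-- ===== VERDICT (by name: the statement is the Claim_ definition above) =====
theorem binary_search_insert_position_spec : Claim_equal_binary_search_insert_position := by
  intro arr target _
  unfold Spec_binary_search_insert_position binary_search_insert_position
  rw [bsLoop_eq_alt arr target (arr.length) 0 (arr.length : Int) (by omega) le_rfl (by positivity) le_rfl]
  simp
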